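-- pv_equiv track=rewrite | github.com/stanykey/puzzles | print-trees/solution.py | _create_tree_data
-- ===== SOURCE A (Python) =====
-- def _create_tree_data(tiers: int) -> list[str]:
--     data: list[str] = []
--
--     current_tier = ['*']
--     for _ in range(0, tiers):
--         current_tier.append(current_tier[-1] + '**')
--         data.extend(current_tier)
--
--     max_stars_count = len(data[-1])
--     data = [line.center(max_stars_count) for line in data]
--     return data
-- ===== SOURCE B (Python) =====
-- def _create_tree_data(tiers: int) -> list[str]:
--     width = 2 * tiers + 1
--     return [('*' * (2 * k + 1)).center(width)
--             for i in range(tiers)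
--             for k in range(i + 2)]
-- ===== Notes on version B (the rewrite author's own statement) =====
-- stated objective: simpler
-- what changed: B emits each centered line directly with a closed-form width 2*tiers+1 in one nested comprehension, instead of A's growing tier list that is re-extended into the output every iteration and centered in a second pass.
import Mathlib
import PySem

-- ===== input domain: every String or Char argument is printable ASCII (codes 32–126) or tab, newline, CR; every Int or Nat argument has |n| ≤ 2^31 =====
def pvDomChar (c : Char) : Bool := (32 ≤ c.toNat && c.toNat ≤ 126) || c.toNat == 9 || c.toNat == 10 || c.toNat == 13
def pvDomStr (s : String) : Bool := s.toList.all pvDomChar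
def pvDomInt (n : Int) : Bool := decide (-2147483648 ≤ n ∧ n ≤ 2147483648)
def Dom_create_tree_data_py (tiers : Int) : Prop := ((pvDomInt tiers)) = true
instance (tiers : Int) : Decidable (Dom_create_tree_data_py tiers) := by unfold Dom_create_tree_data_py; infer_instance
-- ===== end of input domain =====

-- B builds each centered line directly (nested closed-form comprehension, width 2*tiers+1)
-- instead of A's re-extended growing tier list with a second centering pass; objective: simpler.


-- ===== PORT A =====
-- Hand port of Python's str.center(width), shared by both ports (PySem has no center):
-- exact — CPython pads with left = marg//2 + (marg & width & 1), the bit test written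
-- out as the both-odd parity test (identical on all ints under two's complement).
def pyCenter (s : String) (width : Int) : String :=
  let cs := s.toList
  let n : Int := cs.length
  if width ≤ n then s
  else
    let marg := width - n
    let left := PySem.Int.floordiv marg 2 + (if marg % 2 = 1 ∧ width % 2 = 1 then 1 else 0)
    String.ofList (List.replicate left.toNat ' ' ++ cs ++ List.replicate (marg - left).toNat ' ')

def create_tree_data_py (tiers : Int) : List String :=
  let st := (PySem.List.pyRange 0 tiers 1).foldl
    (fun (st : List String × List String) _ =>
      let ct := st.2 ++ [PySem.List.pyGetD st.2 (-1) "" ++ "**"]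
      (st.1 ++ ct, ct))
    ([], ["*"])
  -- data[-1] raises IndexError for tiers ≤ 0: excluded by Pre_; the default "" is unclaimed there
  let maxStars := PySem.Str.len (PySem.List.pyGetD st.1 (-1) "")
  st.1.map (fun line => pyCenter line maxStars)

-- ===== PORT B =====
-- Hand port of Python's string repeat c * n (PySem has no string repeat): '' for n ≤ 0, exact.
def pyStrMul (c : Char) (n : Int) : String := String.ofList (List.replicate n.toNat c)

def create_tree_data_py_alt (tiers : Int) : List String :=
  let width := 2 * tiers + 1
  (PySem.List.pyRange 0 tiers 1).flatMap (fun i =>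
    (PySem.List.pyRange 0 (i + 2) 1).map (fun k =>
      pyCenter (pyStrMul '*' (2 * k + 1)) width))

-- ===== PRECONDITION & SPEC =====
-- A raises IndexError (data[-1] on the empty list) for tiers ≤ 0; those inputs are excluded.
def Pre_create_tree_data_py (tiers : Int) : Prop := 1 ≤ tiers
instance (tiers : Int) : Decidable (Pre_create_tree_data_py tiers) := by unfold Pre_create_tree_data_py; infer_instance
def pvWitness_create_tree_data_py : Int := 1

def Spec_create_tree_data_py (tiers : Int) (out : List String) : Prop := out = create_tree_data_py_alt tiers
instance (tiers : Int) (out : List String) : Decidable (Spec_create_tree_data_py tiers out) := by unfold Spec_create_tree_data_py; infer_instance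

-- ===== CLAIM (what is proved, stated in full; the proofs are below) =====
def Claim_equal_create_tree_data_py : Prop := ∀ (tiers : Int), Dom_create_tree_data_py tiers → Pre_create_tree_data_py tiers → Spec_create_tree_data_py tiers (create_tree_data_py tiers)

-- ===== LEMMAS AND PROOFS =====
def starsN (k : Nat) : String := String.ofList (List.replicate (2*k+1) '*')
def ctN (m : Nat) : List String := (List.range (m+1)).map starsN
def dataN (m : Nat) : List String := (List.range m).flatMap (fun i => (List.range (i+2)).map starsN)

lemma stars_zero : starsN 0 = "*" := by decide

lemma stars_append (m : Nat) : starsN m ++ "**" = starsN (m+1) := by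
  unfold starsN
  have h3 : "**" = String.ofList (List.replicate 2 '*') := rfl
  rw [h3, ← String.ofList_append]
  refine congrArg String.ofList ?_
  rw [← List.replicate_add]
  congr 1

lemma ctN_ne_nil (m : Nat) : ctN m ≠ [] := by simp [ctN]

lemma ctN_getLast (m : Nat) (h : ctN m ≠ []) : (ctN m).getLast h = starsN m := by
  rw [List.getLast_eq_getElem]
  simp [ctN]

lemma ctN_succ (m : Nat) : ctN m ++ [starsN (m+1)] = ctN (m+1) := by
  simp [ctN, List.range_succ]

lemma dataN_succ (m : Nat) : dataN m ++ ctN (m+1) = dataN (m+1) := by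
  simp [dataN, ctN, List.range_succ]

lemma loop_inv (l : List Int) (m : Nat) :
    l.foldl (fun (st : List String × List String) _ =>
      let ct := st.2 ++ [PySem.List.pyGetD st.2 (-1) "" ++ "**"]
      (st.1 ++ ct, ct)) (dataN m, ctN m)
    = (dataN (m + l.length), ctN (m + l.length)) := by
  induction l generalizing m with
  | nil => simp
  | cons x t ih =>
    have hlast : PySem.List.pyGetD (ctN m) (-1) "" = starsN m := by
      rw [PySem.List.pyGetD_neg_one _ _ (ctN_ne_nil m)]
      exact ctN_getLast m _
    simp only [List.foldl_cons, hlast, stars_append, ctN_succ]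
    rw [dataN_succ]
    rw [ih (m+1)]
    simp only [List.length_cons]
    congr 2 <;> omega

lemma dataN_getLast (m : Nat) (hm : 1 ≤ m) : PySem.List.pyGetD (dataN m) (-1) "" = starsN m := by
  obtain ⟨m', rfl⟩ : ∃ m', m = m' + 1 := ⟨m - 1, by omega⟩
  rw [← dataN_succ, ← ctN_succ, ← List.append_assoc,
    PySem.List.pyGetD_neg_one_append_singleton]

lemma starsN_len (m : Nat) : PySem.Str.len (starsN m) = ((2*m+1 : Nat) : Int) := by
  simp [starsN, PySem.Str.len_eq]

lemma block_B (i : Nat) (W : Int) :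
    (PySem.List.pyRange 0 ((0:Int) + i + 2) 1).map
      (fun k => pyCenter (pyStrMul '*' (2 * k + 1)) W)
    = (List.range (i+2)).map (fun k => pyCenter (starsN k) W) := by
  rw [PySem.List.pyRange_one]
  have h1 : (((0:Int) + i + 2) - 0).toNat = i + 2 := by omega
  rw [h1, List.map_map]
  refine List.map_congr_left ?_
  intro k _
  have h2 : (2 * ((0:Int) + k) + 1).toNat = 2*k+1 := by omega
  simp only [Function.comp_apply, pyStrMul, starsN]
  rw [h2]

-- ===== VERDICT (by name: the statement is the Claim_ definition above) =====
theorem create_tree_data_py_spec : Claim_equal_create_tree_data_py := by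
  intro tiers _ hpre
  unfold Spec_create_tree_data_py
  unfold Pre_create_tree_data_py at hpre
  obtain ⟨m, rfl⟩ : ∃ m : Nat, tiers = (m : Int) :=
    ⟨tiers.toNat, (Int.toNat_of_nonneg (by omega)).symm⟩
  have hm : 1 ≤ m := by omega
  have hlen : (PySem.List.pyRange 0 (m : Int) 1).length = m := by
    rw [PySem.List.length_pyRange_one]; omega
  have hfold : (PySem.List.pyRange 0 (m : Int) 1).foldl
      (fun (st : List String × List String) _ =>
        let ct := st.2 ++ [PySem.List.pyGetD st.2 (-1) "" ++ "**"]
        (st.1 ++ ct, ct)) ([], ["*"]) = (dataN m, ctN m) := by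
    have hinit : (([], ["*"]) : List String × List String) = (dataN 0, ctN 0) := by
      simp [dataN, ctN, stars_zero]
    rw [hinit, loop_inv, hlen, Nat.zero_add]
  simp only [create_tree_data_py, create_tree_data_py_alt]
  rw [hfold]
  simp only
  rw [dataN_getLast m hm, starsN_len]
  rw [PySem.List.pyRange_one, List.flatMap_map]
  have h0 : (((m:Int)) - 0).toNat = m := by omega
  rw [h0]
  unfold dataN
  rw [List.map_flatMap]
  refine List.flatMap_congr ?_
  intro i _
  rw [List.map_map]
  have hW : ((2*m+1 : Nat) : Int) = 2 * (m:Int) + 1 := by push_cast; ring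
  rw [hW]
  exact (block_B i (2 * (m:Int) + 1)).symm
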